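-- pv_equiv track=rewrite | github.com/ArvindAero360/TENDERAI | extractor/services.py | extract_state_from_doc
-- ===== SOURCE A (Python) =====
-- INDIA_STATE_NAMES = {
--     'andhra pradesh', 'arunachal pradesh', 'assam', 'bihar', 'chhattisgarh',
--     'goa', 'gujarat', 'haryana', 'himachal pradesh', 'jharkhand', 'karnataka',
--     'kerala', 'madhya pradesh', 'maharashtra', 'manipur', 'meghalaya',
--     'mizoram', 'nagaland', 'odisha', 'punjab', 'rajasthan', 'sikkim',
--     'tamil nadu', 'telangana', 'tripura', 'uttar pradesh', 'uttarakhand',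
--     'west bengal', 'delhi', 'jammu & kashmir', 'ladakh', 'puducherry',
--     'chandigarh', 'andaman & nicobar islands', 'lakshadweep',
--     'dadra and nagar haveli', 'daman and diu',
-- }
--
-- _STATE_DISPLAY = {s: s.title() for s in INDIA_STATE_NAMES}
--
-- def extract_state_from_doc(doc_text: str):
--     if not doc_text:
--         return None
--     text_lower = doc_text.lower()
--     for sname in sorted(INDIA_STATE_NAMES, key=len, reverse=True):
--         if sname in text_lower:
--             return _STATE_DISPLAY.get(sname, sname.title())
--     return None
-- ===== SOURCE B (Python) =====
-- INDIA_STATE_NAMES = {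
--     'andhra pradesh', 'arunachal pradesh', 'assam', 'bihar', 'chhattisgarh',
--     'goa', 'gujarat', 'haryana', 'himachal pradesh', 'jharkhand', 'karnataka',
--     'kerala', 'madhya pradesh', 'maharashtra', 'manipur', 'meghalaya',
--     'mizoram', 'nagaland', 'odisha', 'punjab', 'rajasthan', 'sikkim',
--     'tamil nadu', 'telangana', 'tripura', 'uttar pradesh', 'uttarakhand',
--     'west bengal', 'delhi', 'jammu & kashmir', 'ladakh', 'puducherry',
--     'chandigarh', 'andaman & nicobar islands', 'lakshadweep',
--     'dadra and nagar haveli', 'daman and diu',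
-- }
--
-- def extract_state_from_doc(doc_text: str):
--     text_lower = doc_text.lower()
--     best = None
--     for s in INDIA_STATE_NAMES:
--         if s in text_lower and (best is None or len(best) < len(s)):
--             best = s
--     return None if best is None else best.title()
-- ===== Notes on version B (the rewrite author's own statement) =====
-- stated objective: simpler
-- what changed: A sorts the 37-name set by length descending and returns at the first substring hit via a precomputed display dict; B makes one unsorted pass over the set keeping the longest match seen so far in an accumulator and title-cases it at the end, with no sort, no display dict and no empty-text guard.
-- outside the precondition, e.g. on extract_state_from_doc('assam bihar'): A returns 'Bihar', B returns 'Bihar'; on extract_state_from_doc('kerala and punjab'): A returns 'Punjab', B returns 'Punjab'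
import Mathlib
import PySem

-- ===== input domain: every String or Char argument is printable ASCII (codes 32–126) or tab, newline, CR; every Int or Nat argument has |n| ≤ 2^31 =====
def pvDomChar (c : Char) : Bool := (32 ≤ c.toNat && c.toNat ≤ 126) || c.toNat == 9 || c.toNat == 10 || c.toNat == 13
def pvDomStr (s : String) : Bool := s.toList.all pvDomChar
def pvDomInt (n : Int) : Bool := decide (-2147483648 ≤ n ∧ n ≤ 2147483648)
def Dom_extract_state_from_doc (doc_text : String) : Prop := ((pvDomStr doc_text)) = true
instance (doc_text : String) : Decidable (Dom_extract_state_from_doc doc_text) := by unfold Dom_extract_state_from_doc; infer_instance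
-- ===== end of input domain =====

-- B replaces A's length-descending sort + first-match loop + display dict by one unsorted pass
-- over the set keeping the longest match in an accumulator (objective: simpler).

-- ===== PORT A =====
-- the module-level set INDIA_STATE_NAMES, ported as the list of its distinct elements (source order)
def pvStates : List String := [
  "andhra pradesh", "arunachal pradesh", "assam", "bihar", "chhattisgarh",
  "goa", "gujarat", "haryana", "himachal pradesh", "jharkhand", "karnataka",
  "kerala", "madhya pradesh", "maharashtra", "manipur", "meghalaya",
  "mizoram", "nagaland", "odisha", "punjab", "rajasthan", "sikkim",
  "tamil nadu", "telangana", "tripura", "uttar pradesh", "uttarakhand",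
  "west bengal", "delhi", "jammu & kashmir", "ladakh", "puducherry",
  "chandigarh", "andaman & nicobar islands", "lakshadweep",
  "dadra and nagar haveli", "daman and diu"]

-- key=len for sorted (Python len as Int)
def pvKeyLen (s : String) : Int := (PySem.Str.len s : Int)

-- str.title(): each cased character is uppercased when the previous character is not alphabetic,
-- lowercased otherwise; exact on the ASCII domain Dom_ (hand-ported: PySem has no title)
def pvTitleChars : List Char → Bool → List Char
  | [], _ => []
  | c :: rest, prevAlpha =>
    (if PySem.Chars.isalpha c then
       (if prevAlpha then PySem.Chars.lowerChar c else PySem.Chars.upperChar c)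
     else c) :: pvTitleChars rest (PySem.Chars.isalpha c)

def pvTitle (s : String) : String := String.ofList (pvTitleChars s.toList false)

-- _STATE_DISPLAY = {s: s.title() for s in INDIA_STATE_NAMES}
def pvDisplay : PySem.Dict String String :=
  PySem.Dict.ofList (pvStates.map (fun s => (s, pvTitle s)))

-- the 'for sname in sorted(...): if sname in text_lower: return ...' loop
def pvALoop (low : String) : List String → Option String
  | [] => none
  | s :: rest =>
      if PySem.Str.isIn s low then some (pvDisplay.getD s (pvTitle s))
      else pvALoop low rest

def extract_state_from_doc (doc_text : String) : Option String :=
  if doc_text == "" then none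
  else
    let text_lower := PySem.Str.lower doc_text
    pvALoop text_lower (PySem.List.sorted pvStates pvKeyLen true)

-- ===== PORT B =====
-- body of B's for-loop: 'if s in text_lower and (best is None or len(best) < len(s)): best = s'
def pvBStep (low : String) (best : Option String) (s : String) : Option String :=
  if PySem.Str.isIn s low &&
      (match best with
       | none => true
       | some b => decide (PySem.Str.len b < PySem.Str.len s))
  then some s else best

def extract_state_from_doc_alt (doc_text : String) : Option String :=
  let text_lower := PySem.Str.lower doc_text
  match pvStates.foldl (pvBStep text_lower) none with
  | none => none
  | some best => some (pvTitle best)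

-- ===== PRECONDITION & SPEC =====
-- Pre_ excludes texts containing two distinct state names of the same, maximal matched length:
-- there the returned value depends on Python's set iteration order (the hash seed), so it is an
-- accident of the run, not a specified value.
def Pre_extract_state_from_doc (doc_text : String) : Prop :=
  ∀ s ∈ pvStates, ∀ t ∈ pvStates,
    PySem.Str.isIn s (PySem.Str.lower doc_text) = true →
    PySem.Str.isIn t (PySem.Str.lower doc_text) = true →
    s ≠ t → PySem.Str.len s = PySem.Str.len t →
    ∃ u ∈ pvStates, PySem.Str.isIn u (PySem.Str.lower doc_text) = true ∧
      PySem.Str.len s < PySem.Str.len u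
instance (doc_text : String) : Decidable (Pre_extract_state_from_doc doc_text) := by
  unfold Pre_extract_state_from_doc; infer_instance

def pvWitness_extract_state_from_doc : String := "tender in west bengal"

def Spec_extract_state_from_doc (doc_text : String) (out : Option String) : Prop :=
  out = extract_state_from_doc_alt doc_text
instance (doc_text : String) (out : Option String) : Decidable (Spec_extract_state_from_doc doc_text out) := by
  unfold Spec_extract_state_from_doc; infer_instance

-- ===== CLAIM (what is proved, stated in full; the proofs are below) =====
def Claim_equal_extract_state_from_doc : Prop :=
  ∀ (doc_text : String), Dom_extract_state_from_doc doc_text →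
    Pre_extract_state_from_doc doc_text →
    Spec_extract_state_from_doc doc_text (extract_state_from_doc doc_text)

-- ===== LEMMAS AND PROOFS =====

-- facts about the concrete 37-name list, checked by computation
theorem pv_states_nonempty : ∀ s ∈ pvStates, s.toList ≠ [] := by decide

set_option maxRecDepth 1000000 in
theorem pv_perm_desc : pvStates.Perm (PySem.List.sorted pvStates pvKeyLen true) := by decide

set_option maxRecDepth 1000000 in
theorem pv_pairwise_desc :
    (PySem.List.sorted pvStates pvKeyLen true).Pairwise (fun a b => pvKeyLen b ≤ pvKeyLen a) := by
  decide

set_option maxRecDepth 1000000 in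
theorem pv_display_items : pvDisplay.items = pvStates.map (fun s => (s, pvTitle s)) := by decide

-- A's loop returns none when nothing matches
theorem pvALoop_none (low : String) (l : List String)
    (h : ∀ s ∈ l, PySem.Str.isIn s low = false) : pvALoop low l = none := by
  induction l with
  | nil => rfl
  | cons x t ih =>
      simp only [pvALoop, h x (by simp)]
      exact ih (fun s hs => h s (by simp [hs]))

-- first-match lookup in an association list built from a key list
theorem pv_find_tab (f : String → String) (l : List String) (u : String) (hu : u ∈ l) :
    (l.map (fun s => (s, f s))).find? (fun p => p.1 == u) = some (u, f u) := by
  induction l with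
  | nil => cases hu
  | cons x t ih =>
      by_cases hx : x = u
      · subst hx; simp
      · have : u ∈ t := by cases hu with
          | head => exact absurd rfl hx
          | tail _ h => exact h
        simp [hx, ih this]

theorem pv_display_getD (u : String) (hu : u ∈ pvStates) :
    pvDisplay.getD u (pvTitle u) = pvTitle u := by
  simp [PySem.Dict.getD, PySem.Dict.get?, pv_display_items, pv_find_tab pvTitle pvStates u hu]

-- A's loop over a length-descending list returns the unique longest match
theorem pvALoop_max (low : String) (l : List String) (u : String)
    (hpair : l.Pairwise (fun a b => pvKeyLen b ≤ pvKeyLen a))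
    (hu : u ∈ l) (hpu : PySem.Str.isIn u low = true)
    (hmax : ∀ v ∈ l, PySem.Str.isIn v low = true → v ≠ u → pvKeyLen v < pvKeyLen u) :
    pvALoop low l = some (pvDisplay.getD u (pvTitle u)) := by
  induction l with
  | nil => cases hu
  | cons x t ih =>
      rcases List.pairwise_cons.mp hpair with ⟨hxle, hpt⟩
      cases hpx : PySem.Str.isIn x low with
      | true =>
        have hxu : x = u := by
          by_contra hne
          have hlt : pvKeyLen x < pvKeyLen u := hmax x (by simp) hpx hne
          have hmem : u ∈ t := by
            cases hu with
            | head => exact absurd rfl hne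
            | tail _ h => exact h
          exact absurd (hxle u hmem) (by omega)
        subst hxu
        simp only [pvALoop]
        rw [if_pos hpx]
      | false =>
        have hxu : x ≠ u := fun h => by rw [h, hpu] at hpx; cases hpx
        have hmem : u ∈ t := by
          cases hu with
          | head => exact absurd rfl hxu
          | tail _ h => exact h
        simp only [pvALoop]
        rw [if_neg (by simpa using hpx)]
        exact ih hpt hmem (fun v hv hpv hne => hmax v (by simp [hv]) hpv hne)

-- how one step of B's loop behaves, case by case
theorem pvBStep_skip (low : String) (acc : Option String) (s : String)
    (hpx : PySem.Str.isIn s low = false) : pvBStep low acc s = acc := by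
  unfold pvBStep; rw [hpx]; simp

theorem pvBStep_none (low : String) (s : String)
    (hpx : PySem.Str.isIn s low = true) : pvBStep low none s = some s := by
  unfold pvBStep; rw [hpx]; simp

theorem pvBStep_keep (low : String) (b s : String)
    (hpx : PySem.Str.isIn s low = true) (h : ¬ PySem.Str.len b < PySem.Str.len s) :
    pvBStep low (some b) s = some b := by
  unfold pvBStep; rw [hpx]
  have h' : ¬ b.length < s.length := by simpa using h
  simp [h']

theorem pvBStep_repl (low : String) (b s : String)
    (hpx : PySem.Str.isIn s low = true) (h : PySem.Str.len b < PySem.Str.len s) :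
    pvBStep low (some b) s = some s := by
  unfold pvBStep; rw [hpx]
  have h' : b.length < s.length := by simpa using h
  simp [h']

-- B's fold stays none when nothing matches
theorem pv_bfold_none (low : String) (l : List String)
    (h : ∀ s ∈ l, PySem.Str.isIn s low = false) :
    l.foldl (pvBStep low) none = none := by
  induction l with
  | nil => rfl
  | cons x t ih =>
      rw [List.foldl_cons, pvBStep_skip low none x (h x (by simp))]
      exact ih (fun s hs => h s (by simp [hs]))

-- once the accumulator holds u, it stays u when nothing later is strictly longer and matching
theorem pv_bfold_post (low : String) (l : List String) (u : String)
    (h : ∀ v ∈ l, PySem.Str.isIn v low = true → ¬ PySem.Str.len u < PySem.Str.len v) :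
    l.foldl (pvBStep low) (some u) = some u := by
  induction l with
  | nil => rfl
  | cons x t ih =>
      rw [List.foldl_cons]
      have hstep : pvBStep low (some u) x = some u := by
        cases hpx : PySem.Str.isIn x low with
        | false => exact pvBStep_skip low (some u) x hpx
        | true => exact pvBStep_keep low u x hpx (h x (by simp) hpx)
      rw [hstep]
      exact ih (fun v hv hpv => h v (by simp [hv]) hpv)

-- B's fold reaches the unique strictly-longest match u
theorem pv_bfold (low : String) (l : List String) (u : String) :
    ∀ acc : Option String, u ∈ l → PySem.Str.isIn u low = true →
    (∀ v ∈ l, PySem.Str.isIn v low = true → v ≠ u → PySem.Str.len v < PySem.Str.len u) →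
    (acc = none ∨ ∃ a, acc = some a ∧ PySem.Str.len a < PySem.Str.len u) →
    l.foldl (pvBStep low) acc = some u := by
  induction l with
  | nil => intro acc hu _ _ _; cases hu
  | cons x t ih =>
      intro acc hu hpu hmax hacc
      rw [List.foldl_cons]
      by_cases hxu : x = u
      · subst hxu
        have hstep : pvBStep low acc x = some x := by
          rcases hacc with rfl | ⟨a, rfl, hlt⟩
          · exact pvBStep_none low x hpu
          · exact pvBStep_repl low a x hpu hlt
        rw [hstep]
        exact pv_bfold_post low t x (fun v hv hpv hlt => by
          by_cases hvu : v = x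
          · subst hvu; omega
          · have := hmax v (by simp [hv]) hpv hvu; omega)
      · have hmem : u ∈ t := by
          cases hu with
          | head => exact absurd rfl hxu
          | tail _ h => exact h
        have hmax' : ∀ v ∈ t, PySem.Str.isIn v low = true → v ≠ u →
            PySem.Str.len v < PySem.Str.len u :=
          fun v hv hpv hne => hmax v (by simp [hv]) hpv hne
        have hacc' : pvBStep low acc x = none ∨
            ∃ a, pvBStep low acc x = some a ∧ PySem.Str.len a < PySem.Str.len u := by
          cases hpx : PySem.Str.isIn x low with
          | false => rw [pvBStep_skip low acc x hpx]; exact hacc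
          | true =>
            have hxlt : PySem.Str.len x < PySem.Str.len u := hmax x (by simp) hpx hxu
            rcases hacc with rfl | ⟨a, rfl, hlt⟩
            · exact Or.inr ⟨x, pvBStep_none low x hpx, hxlt⟩
            · by_cases h2 : PySem.Str.len a < PySem.Str.len x
              · exact Or.inr ⟨x, pvBStep_repl low a x hpx h2, hxlt⟩
              · exact Or.inr ⟨a, pvBStep_keep low a x hpx h2, hlt⟩
        exact ih (pvBStep low acc x) hmem hpu hmax' hacc'

theorem pv_empty_no_match (u : String) (hu : u ∈ pvStates)
    (h : PySem.Str.isIn u (PySem.Str.lower "") = true) : False := by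
  have : u.toList <:+: (PySem.Str.lower "").toList := (PySem.Str.isIn_iff_infix _ _).mp h
  have hnil : (PySem.Str.lower "").toList = [] := by decide
  rw [hnil] at this
  exact pv_states_nonempty u hu (List.eq_nil_of_infix_nil this)

-- ===== VERDICT (by name: the statement is the Claim_ definition above) =====
theorem extract_state_from_doc_spec : Claim_equal_extract_state_from_doc := by
  intro doc _ hPre
  unfold Spec_extract_state_from_doc
  by_cases hM : ∀ s ∈ pvStates, PySem.Str.isIn s (PySem.Str.lower doc) = false
  · -- nothing matches: both return none
    have hB : extract_state_from_doc_alt doc = none := by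
      show (match pvStates.foldl (pvBStep (PySem.Str.lower doc)) none with
            | none => none
            | some best => some (pvTitle best)) = none
      rw [pv_bfold_none _ _ hM]
    have hA : extract_state_from_doc doc = none := by
      by_cases hd : doc = ""
      · subst hd; rfl
      · show (if doc == "" then none
            else pvALoop (PySem.Str.lower doc) (PySem.List.sorted pvStates pvKeyLen true)) = none
        rw [if_neg (by simpa using hd)]
        exact pvALoop_none _ _ (fun s hs => hM s (pv_perm_desc.mem_iff.mpr hs))
    rw [hA, hB]
  · -- some name matches; get a matching name of maximal length, unique by Pre_
    have hex : ∃ s ∈ pvStates, PySem.Str.isIn s (PySem.Str.lower doc) = true := by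
      by_contra hno
      exact hM (fun s hs => by
        cases hb : PySem.Str.isIn s (PySem.Str.lower doc) with
        | false => rfl
        | true => exact absurd ⟨s, hs, hb⟩ hno)
    have hfin : ∃ u ∈ pvStates, PySem.Str.isIn u (PySem.Str.lower doc) = true ∧
        ∀ v ∈ pvStates, PySem.Str.isIn v (PySem.Str.lower doc) = true →
          PySem.Str.len v ≤ PySem.Str.len u := by
      rcases hex with ⟨s0, hs0, hps0⟩
      -- take a maximal matching name by induction on the list
      have key : ∀ l : List String, (∀ x ∈ l, x ∈ pvStates) →
          ∀ s ∈ l, PySem.Str.isIn s (PySem.Str.lower doc) = true →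
          ∃ u ∈ pvStates, PySem.Str.isIn u (PySem.Str.lower doc) = true ∧
            ∀ v ∈ l, PySem.Str.isIn v (PySem.Str.lower doc) = true →
              PySem.Str.len v ≤ PySem.Str.len u := by
        intro l
        induction l with
        | nil => intro _ s hs; cases hs
        | cons x t ih =>
          intro hsub s hs hps
          by_cases hmt : ∃ s' ∈ t, PySem.Str.isIn s' (PySem.Str.lower doc) = true
          · rcases hmt with ⟨s', hs', hps'⟩
            rcases ih (fun y hy => hsub y (by simp [hy])) s' hs' hps' with ⟨u, hu, hpu, hmax⟩
            cases hpx : PySem.Str.isIn x (PySem.Str.lower doc) with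
            | false =>
              exact ⟨u, hu, hpu, fun v hv hpv => by
                cases hv with
                | head => rw [hpx] at hpv; cases hpv
                | tail _ h => exact hmax v h hpv⟩
            | true =>
              by_cases hc : PySem.Str.len u ≤ PySem.Str.len x
              · exact ⟨x, hsub x (by simp), hpx, fun v hv hpv => by
                  cases hv with
                  | head => omega
                  | tail _ h => have := hmax v h hpv; omega⟩
              · exact ⟨u, hu, hpu, fun v hv hpv => by
                  cases hv with
                  | head => omega
                  | tail _ h => exact hmax v h hpv⟩
          · -- no match in the tail: x must be the matching s
            have hxs : x = s := by
              cases hs with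
              | head => rfl
              | tail _ h => exact absurd ⟨s, h, hps⟩ hmt
            subst hxs
            exact ⟨x, hsub x (by simp), hps, fun v hv hpv => by
              cases hv with
              | head => omega
              | tail _ h => exact absurd ⟨v, h, hpv⟩ hmt⟩
      exact key pvStates (fun _ h => h) s0 hs0 hps0
    rcases hfin with ⟨u, hust, hpu, hle⟩
    have hstrict : ∀ v ∈ pvStates, PySem.Str.isIn v (PySem.Str.lower doc) = true → v ≠ u →
        PySem.Str.len v < PySem.Str.len u := by
      intro v hv hpv hne
      have hvle := hle v hv hpv
      rcases lt_or_eq_of_le hvle with h | h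
      · exact h
      · rcases hPre v hv u hust hpv hpu hne h with ⟨w, hw, hpw, hwlt⟩
        have := hle w hw hpw
        omega
    have hd : doc ≠ "" := fun h => pv_empty_no_match u hust (h ▸ hpu)
    have hA : extract_state_from_doc doc = some (pvTitle u) := by
      show (if doc == "" then none
          else pvALoop (PySem.Str.lower doc) (PySem.List.sorted pvStates pvKeyLen true)) =
        some (pvTitle u)
      rw [if_neg (by simpa using hd)]
      rw [pvALoop_max (PySem.Str.lower doc) _ u pv_pairwise_desc
        (pv_perm_desc.mem_iff.mp hust) hpu
        (fun v hv hpv hne => by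
          have := hstrict v (pv_perm_desc.mem_iff.mpr hv) hpv hne
          unfold pvKeyLen; omega)]
      rw [pv_display_getD u hust]
    have hB : extract_state_from_doc_alt doc = some (pvTitle u) := by
      show (match pvStates.foldl (pvBStep (PySem.Str.lower doc)) none with
            | none => none
            | some best => some (pvTitle best)) = some (pvTitle u)
      rw [pv_bfold (PySem.Str.lower doc) pvStates u none hust hpu hstrict (Or.inl rfl)]
    rw [hA, hB]
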